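-- pv_equiv track=rewrite | github.com/JacksonDagger/wreck-beach-exercise | wreckBeach.py | wreckRecursive
-- ===== SOURCE A (Python) =====
-- def wreckRecursive(stair, stamina, index):
--     length = len(stair)
--     if index+1 >= length:
--         return stamina
--
--     maxStamina = wreckRecursive(stair, stamina-stair[index+1], index+1)
--     if index+2 < length:
--         tempStamina = wreckRecursive(stair, stamina-stair[index+2]-1, index+2)
--     else:
--         tempStamina=stamina-1
--
--     if tempStamina > maxStamina:
--         maxStamina = tempStamina
--
--     if index+3 < length:
--         tempStamina = wreckRecursive(stair, stamina-stair[index+3]-2, index+3)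
--     else:
--         tempStamina=stamina-2
--
--     if tempStamina > maxStamina:
--         maxStamina = tempStamina
--     return maxStamina
-- ===== SOURCE B (Python) =====
-- def wreckRecursive(stair, stamina, index):
--     n = len(stair)
--     if index + 1 >= n:
--         return stamina
--     f = [0]  # f[k] = best stamina delta starting from step i+1+k; built back-to-front
--     i = n - 2
--     while i >= index:
--         c1 = -stair[i + 1] + f[0]
--         c2 = (-stair[i + 2] - 1 + f[1]) if i + 2 < n else -1
--         c3 = (-stair[i + 3] - 2 + f[2]) if i + 3 < n else -2
--         f = [max(c1, c2, c3)] + f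
--         i -= 1
--     return stamina + f[0]
-- ===== Notes on version B (the rewrite author's own statement) =====
-- stated objective: alternative
-- what changed: Replaced A's exponential three-way recursion by a single back-to-front dynamic-programming pass that builds the list of best stamina deltas per step and adds the starting stamina once.
import Mathlib
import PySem

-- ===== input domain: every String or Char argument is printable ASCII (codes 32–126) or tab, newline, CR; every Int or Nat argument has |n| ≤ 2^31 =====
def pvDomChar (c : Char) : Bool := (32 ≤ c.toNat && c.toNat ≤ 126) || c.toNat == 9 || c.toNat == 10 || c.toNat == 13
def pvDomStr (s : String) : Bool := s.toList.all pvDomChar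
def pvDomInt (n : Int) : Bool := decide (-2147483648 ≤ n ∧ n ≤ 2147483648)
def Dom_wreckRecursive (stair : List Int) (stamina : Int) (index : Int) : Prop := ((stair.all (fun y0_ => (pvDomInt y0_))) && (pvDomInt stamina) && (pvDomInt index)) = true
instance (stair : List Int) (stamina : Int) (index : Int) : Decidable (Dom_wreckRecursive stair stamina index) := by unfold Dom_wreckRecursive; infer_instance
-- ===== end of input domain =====

-- B replaces A's three-way recursion by a single back-to-front DP pass over a list of per-step stamina deltas (objective: alternative).

-- ===== PORT A =====
def wreckRecursive (stair : List Int) (stamina : Int) (index : Int) : Int :=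
  let length : Int := stair.length
  if index + 1 ≥ length then stamina
  else
    let maxStamina := wreckRecursive stair (stamina - (PySem.List.pyGet? stair (index + 1)).getD 0) (index + 1)
    let temp2 : Int :=
      if index + 2 < length then
        wreckRecursive stair (stamina - (PySem.List.pyGet? stair (index + 2)).getD 0 - 1) (index + 2)
      else stamina - 1
    let max2 := if temp2 > maxStamina then temp2 else maxStamina
    let temp3 : Int :=
      if index + 3 < length then
        wreckRecursive stair (stamina - (PySem.List.pyGet? stair (index + 3)).getD 0 - 2) (index + 3)
      else stamina - 2
    if temp3 > max2 then temp3 else max2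
termination_by ((stair.length : Int) - index).toNat
decreasing_by all_goals (simp at *; omega)

-- ===== PORT B =====
def wreckGo (stair : List Int) (index : Int) (i : Int) (f : List Int) : List Int :=
  if i ≥ index then
    let n : Int := stair.length
    let c1 := -((PySem.List.pyGet? stair (i + 1)).getD 0) + (PySem.List.pyGet? f 0).getD 0
    let c2 := if i + 2 < n then -((PySem.List.pyGet? stair (i + 2)).getD 0) - 1 + (PySem.List.pyGet? f 1).getD 0 else -1
    let c3 := if i + 3 < n then -((PySem.List.pyGet? stair (i + 3)).getD 0) - 2 + (PySem.List.pyGet? f 2).getD 0 else -2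
    wreckGo stair index (i - 1) (max (max c1 c2) c3 :: f)
  else f
termination_by (i - index + 1).toNat
decreasing_by simp at *; omega

def wreckRecursive_alt (stair : List Int) (stamina : Int) (index : Int) : Int :=
  let n : Int := stair.length
  if index + 1 ≥ n then stamina
  else stamina + (PySem.List.pyGet? (wreckGo stair index (n - 2) [0]) 0).getD 0

-- ===== PRECONDITION & SPEC =====
-- Pre_ excludes exactly the inputs where Python A raises IndexError (a negative index below -len(stair)-1 wraps past the front of the list); B raises there too.
def Pre_wreckRecursive (stair : List Int) (stamina : Int) (index : Int) : Prop :=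
  -(stair.length : Int) - 1 ≤ index
instance (stair : List Int) (stamina : Int) (index : Int) : Decidable (Pre_wreckRecursive stair stamina index) := by unfold Pre_wreckRecursive; infer_instance
def pvWitness_wreckRecursive : List Int × Int × Int := ([3, -1, 2, 4], 10, 0)

def Spec_wreckRecursive (stair : List Int) (stamina : Int) (index : Int) (out : Int) : Prop := out = wreckRecursive_alt stair stamina index
instance (stair : List Int) (stamina : Int) (index : Int) (out : Int) : Decidable (Spec_wreckRecursive stair stamina index out) := by unfold Spec_wreckRecursive; infer_instance

-- ===== CLAIM (what is proved, stated in full; the proofs are below) =====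
def Claim_equal_wreckRecursive : Prop := ∀ (stair : List Int) (stamina : Int) (index : Int), Dom_wreckRecursive stair stamina index → Pre_wreckRecursive stair stamina index → Spec_wreckRecursive stair stamina index (wreckRecursive stair stamina index)

-- ===== LEMMAS AND PROOFS =====

-- The mathematical value: best stamina delta of the walk starting at `i` (A's result minus the incoming stamina).
def wreckF (stair : List Int) (i : Int) : Int :=
  if i + 1 ≥ (stair.length : Int) then 0
  else
    let c1 := -((PySem.List.pyGet? stair (i + 1)).getD 0) + wreckF stair (i + 1)
    let c2 := if i + 2 < (stair.length : Int) then -((PySem.List.pyGet? stair (i + 2)).getD 0) - 1 + wreckF stair (i + 2) else -1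
    let c3 := if i + 3 < (stair.length : Int) then -((PySem.List.pyGet? stair (i + 3)).getD 0) - 2 + wreckF stair (i + 3) else -2
    max (max c1 c2) c3
termination_by ((stair.length : Int) - i).toNat
decreasing_by all_goals (simp at *; omega)

-- A is stamina-linear: it returns the incoming stamina plus wreckF of the index.
theorem wreckRecursive_eq_add_F (stair : List Int) (stamina index : Int) :
    wreckRecursive stair stamina index = stamina + wreckF stair index := by
  rw [wreckRecursive, wreckF]
  by_cases h : index + 1 ≥ (stair.length : Int)
  · simp [h]
  · simp only [if_neg h]
    rw [wreckRecursive_eq_add_F stair _ (index + 1),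
        wreckRecursive_eq_add_F stair _ (index + 2),
        wreckRecursive_eq_add_F stair _ (index + 3)]
    simp only [max_def]
    split_ifs <;> omega
termination_by ((stair.length : Int) - index).toNat
decreasing_by all_goals (simp at *; omega)

-- The suffix list [wreckF (i+1), …, wreckF (n-1)] that B's loop maintains.
def wreckTail (stair : List Int) (i : Int) : List Int :=
  (List.range ((stair.length : Int) - 1 - i).toNat).map (fun k : Nat => wreckF stair (i + 1 + (k : Int)))

theorem wreckTail_cons (stair : List Int) (i : Int) (h : i ≤ (stair.length : Int) - 2) :
    wreckTail stair i = wreckF stair (i + 1) :: wreckTail stair (i + 1) := by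
  unfold wreckTail
  have hm : ((stair.length : Int) - 1 - i).toNat = ((stair.length : Int) - 1 - (i + 1)).toNat + 1 := by omega
  rw [hm, List.range_succ_eq_map, List.map_cons, List.map_map]
  simp only [Nat.cast_zero, add_zero, List.cons.injEq]
  refine ⟨trivial, List.map_congr_left fun k _ => ?_⟩
  simp only [Function.comp_apply]
  congr 1
  push_cast
  ring

theorem pyGet_one_cons (x y : Int) (l : List Int) : PySem.List.pyGet? (x :: y :: l) 1 = some y := by
  simp [PySem.List.pyGet?, PySem.List.pyIdx?]

theorem pyGet_two_cons (x y z : Int) (l : List Int) : PySem.List.pyGet? (x :: y :: z :: l) 2 = some z := by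
  simp [PySem.List.pyGet?, PySem.List.pyIdx?, show ((2:Int) ≤ (l.length:Int)+1+1) by omega]

theorem wreckGo_inv (stair : List Int) (index i : Int) (h1 : index - 1 ≤ i) (h2 : i ≤ (stair.length : Int) - 2) :
    wreckGo stair index i (wreckTail stair i) = wreckTail stair (index - 1) := by
  rw [wreckGo]
  by_cases hi : i ≥ index
  · rw [if_pos hi]
    have hcons : wreckTail stair i = wreckF stair (i + 1) :: wreckTail stair (i + 1) :=
      wreckTail_cons stair i h2
    have key : (max (max
        (-((PySem.List.pyGet? stair (i + 1)).getD 0) + (PySem.List.pyGet? (wreckTail stair i) 0).getD 0)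
        (if i + 2 < (stair.length : Int) then
          -((PySem.List.pyGet? stair (i + 2)).getD 0) - 1 + (PySem.List.pyGet? (wreckTail stair i) 1).getD 0
         else -1))
        (if i + 3 < (stair.length : Int) then
          -((PySem.List.pyGet? stair (i + 3)).getD 0) - 2 + (PySem.List.pyGet? (wreckTail stair i) 2).getD 0
         else -2)) = wreckF stair i := by
      rw [wreckF, if_neg (by omega : ¬ i + 1 ≥ (stair.length : Int))]
      congr 1
      · congr 1
        · rw [hcons, PySem.List.pyGet?_zero_cons]; rfl
        · by_cases g2 : i + 2 < (stair.length : Int)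
          · rw [if_pos g2, if_pos g2, hcons,
              wreckTail_cons stair (i + 1) (by omega), pyGet_one_cons,
              show i + 1 + 1 = i + 2 by ring]
            rfl
          · rw [if_neg g2, if_neg g2]
      · by_cases g3 : i + 3 < (stair.length : Int)
        · rw [if_pos g3, if_pos g3, hcons,
            wreckTail_cons stair (i + 1) (by omega),
            wreckTail_cons stair (i + 1 + 1) (by omega), pyGet_two_cons,
            show i + 1 + 1 + 1 = i + 3 by ring]
          rfl
        · rw [if_neg g3, if_neg g3]
    have harg : wreckF stair i :: wreckTail stair i = wreckTail stair (i - 1) := by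
      rw [wreckTail_cons stair (i - 1) (by omega)]
      norm_num
    simp only [key, harg]
    exact wreckGo_inv stair index (i - 1) (by omega) (by omega)
  · rw [if_neg hi]
    congr 1
    omega
termination_by (i - index + 1).toNat
decreasing_by simp at *; omega

theorem alt_eq_add_F (stair : List Int) (stamina index : Int) (h : ¬ index + 1 ≥ (stair.length : Int)) :
    wreckRecursive_alt stair stamina index = stamina + wreckF stair index := by
  rw [wreckRecursive_alt]
  simp only [if_neg h]
  have hstart : ([0] : List Int) = wreckTail stair ((stair.length : Int) - 2) := by
    unfold wreckTail
    have : ((stair.length : Int) - 1 - ((stair.length : Int) - 2)).toNat = 1 := by omega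
    rw [this]
    simp [List.range_one]
    rw [wreckF, if_pos (by omega)]
  rw [hstart, wreckGo_inv stair index ((stair.length : Int) - 2) (by omega) (by omega),
    wreckTail_cons stair (index - 1) (by omega), PySem.List.pyGet?_zero_cons]
  norm_num

-- ===== VERDICT (by name: the statement is the Claim_ definition above) =====
theorem wreckRecursive_spec : Claim_equal_wreckRecursive := by
  intro stair stamina index _ _
  unfold Spec_wreckRecursive
  by_cases h : index + 1 ≥ (stair.length : Int)
  · rw [wreckRecursive, wreckRecursive_alt]; simp [h]
  · rw [wreckRecursive_eq_add_F, alt_eq_add_F stair stamina index h]
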